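-- pv_equiv track=rewrite | github.com/kwshi/aoc-2020 | solutions/python/09.py | bad
-- ===== SOURCE A (Python) =====
-- import collections as co
-- import itertools as it
--
-- def bad(nums, pre):
--     last = co.deque(nums[:pre])
--     sums = co.defaultdict(int)
--     for m, n in it.combinations(last, 2):
--         sums[m + n] += 1
--
--     for n in nums[pre:]:
--         if sums[n] == 0:
--             return n
--         k = last.popleft()
--         for m in last:
--             sums[k + m] -= 1
--             sums[m + n] += 1
--         last.append(n)
-- ===== SOURCE B (Python) =====
-- import collections as co
--
-- def bad(nums, pre):
--     window = list(nums[:pre])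
--     for n in nums[pre:]:
--         cnt = co.Counter(window)
--         if any(cnt[n - m] >= (2 if n - m == m else 1) for m in window):
--             window = window[1:] + [n]
--         else:
--             return n
--     return None
-- ===== Notes on version B (the rewrite author's own statement) =====
-- stated objective: simpler
-- what changed: Instead of incrementally maintaining a defaultdict of all pairwise sums of the window (rebalanced on every slide), B rebuilds a Counter of the window per element and tests membership of n-m directly (count >= 2 when n == 2m), with no pair-sums structure at all.
import Mathlib
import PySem

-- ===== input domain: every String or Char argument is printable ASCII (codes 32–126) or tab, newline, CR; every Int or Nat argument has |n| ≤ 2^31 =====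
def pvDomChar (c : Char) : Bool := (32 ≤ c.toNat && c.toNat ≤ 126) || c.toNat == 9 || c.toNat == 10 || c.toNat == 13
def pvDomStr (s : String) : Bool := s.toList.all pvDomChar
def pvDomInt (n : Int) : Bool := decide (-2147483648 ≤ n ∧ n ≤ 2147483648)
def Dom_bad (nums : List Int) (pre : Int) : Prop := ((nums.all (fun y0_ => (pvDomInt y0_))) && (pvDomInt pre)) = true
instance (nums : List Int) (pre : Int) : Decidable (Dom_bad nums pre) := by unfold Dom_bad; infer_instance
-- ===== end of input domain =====

-- B replaces A's incrementally rebalanced pair-sums defaultdict by a per-element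
-- Counter-membership test on the window (objective: simpler).

-- ===== PORT A =====
-- second loop of A: early return, popleft + incremental dict rebalance, append
def badLoop : List Int → List Int → PySem.Dict Int Int → Option Int
  | [], _, _ => none
  | n :: rest, last, sums =>
    if sums.getD n 0 = 0 then some n
    else match last with
      | [] => none  -- popleft on an empty deque: unreachable (an empty window forces sums.getD n 0 = 0)
      | k :: tl =>
        badLoop rest (tl ++ [n])
          (tl.foldl (fun d m => (d.modify (k + m) 0 (· - 1)).modify (m + n) 0 (· + 1)) sums)

def bad (nums : List Int) (pre : Int) : Option Int :=
  let last := PySem.List.slice nums none (some pre)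
  let sums := (PySem.List.combinations last 2).foldl
    (fun d c => match c with
      | [m, n] => d.modify (m + n) 0 (· + 1)
      | _ => d) PySem.Dict.empty
  badLoop (PySem.List.slice nums (some pre) none) last sums

-- ===== PORT B =====
def altLoop : List Int → List Int → Option Int
  | [], _ => none
  | n :: rest, window =>
    let cnt := PySem.Dict.counter window
    if window.any (fun m => decide ((if n - m = m then (2 : Int) else 1) ≤ cnt.getD (n - m) 0)) then
      altLoop rest (PySem.List.slice window (some 1) none ++ [n])
    else some n

def bad_alt (nums : List Int) (pre : Int) : Option Int :=
  altLoop (PySem.List.slice nums (some pre) none) (PySem.List.slice nums none (some pre))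

-- ===== PRECONDITION & SPEC =====
def Spec_bad (nums : List Int) (pre : Int) (out : Option Int) : Prop := out = bad_alt nums pre
instance (nums : List Int) (pre : Int) (out : Option Int) : Decidable (Spec_bad nums pre out) := by unfold Spec_bad; infer_instance

-- ===== CLAIM (what is proved, stated in full; the proofs are below) =====
def Claim_equal_bad : Prop := ∀ (nums : List Int) (pre : Int), Dom_bad nums pre → Spec_bad nums pre (bad nums pre)

-- ===== LEMMAS AND PROOFS =====

-- list of all pairwise sums w[i]+w[j], i<j, of the window
def pairSums : List Int → List Int
  | [] => []
  | x :: xs => xs.map (x + ·) ++ pairSums xs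

theorem foldA_getD (s : Int) (w : List Int) (d : PySem.Dict Int Int) :
    (((PySem.List.combinations w 2).foldl
      (fun d c => match c with
        | [m, n] => d.modify (m + n) 0 (· + 1)
        | _ => d) d).getD s 0) = d.getD s 0 + ((pairSums w).count s : Int) := by
  induction w generalizing d with
  | nil => simp [PySem.List.combinations, pairSums]
  | cons x xs ih =>
    rw [PySem.List.combinations_cons_succ, PySem.List.combinations_one, List.foldl_append,
      List.map_map, List.foldl_map, ih]
    have h2 : (fun (d : PySem.Dict Int Int) y =>
        match ((fun c => x :: c) ∘ fun y => [y]) y with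
        | [m, n] => d.modify (m + n) 0 (· + 1)
        | _ => d) = fun (d : PySem.Dict Int Int) y => d.modify (x + y) 0 (· + 1) := rfl
    rw [h2]
    have h3 : (xs.foldl (fun (d : PySem.Dict Int Int) y => d.modify (x + y) 0 (· + 1)) d)
        = ((xs.map (x + ·)).foldl (fun d z => d.modify z 0 (· + 1)) d) := by
      rw [List.foldl_map]
    rw [h3, PySem.Dict.getD_foldl_modify_add_one]
    simp [pairSums, List.count_append]
    omega

theorem step_getD (tl : List Int) (d : PySem.Dict Int Int) (k n s : Int) :
    ((tl.foldl (fun d m => (d.modify (k + m) 0 (· - 1)).modify (m + n) 0 (· + 1)) d).getD s 0)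
      = d.getD s 0 - ((tl.map (k + ·)).count s : Int) + ((tl.map (· + n)).count s : Int) := by
  induction tl generalizing d with
  | nil => simp
  | cons m tl ih =>
    have hd' : ((d.modify (k + m) 0 (· - 1)).modify (m + n) 0 (· + 1)).getD s 0
        = d.getD s 0 - (if k + m = s then 1 else 0) + (if m + n = s then 1 else 0) := by
      rcases eq_or_ne s (m + n) with hB | hB <;> rcases eq_or_ne s (k + m) with hA | hA <;>
        simp_all [PySem.Dict.getD_modify] <;> omega
    simp only [List.foldl_cons, ih, hd', List.map_cons, List.count_cons, beq_iff_eq]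
    split_ifs <;> push_cast <;> omega

theorem pairSums_append (tl : List Int) (n s : Int) :
    (pairSums (tl ++ [n])).count s = (pairSums tl).count s + (tl.map (· + n)).count s := by
  induction tl with
  | nil => simp [pairSums]
  | cons x tl ih =>
    simp only [List.cons_append, pairSums, List.map_append, List.count_append, ih,
      List.map_cons, List.map_nil, List.count_cons, List.count_nil]
    omega

theorem two_count_mem (w : List Int) (m : Int) (h : 2 ≤ w.count m) : m + m ∈ pairSums w := by
  induction w with
  | nil => simp at h
  | cons x xs ih =>
    simp only [List.count_cons, beq_iff_eq] at h
    by_cases hx : x = m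
    · have hmem : m ∈ xs := by
        rw [← List.count_pos_iff]
        rw [if_pos hx] at h
        omega
      exact List.mem_append.2 (Or.inl (List.mem_map.2 ⟨m, hmem, by rw [hx]⟩))
    · rw [if_neg hx] at h
      exact List.mem_append.2 (Or.inr (ih (by omega)))

theorem ne_mem_mem (w : List Int) (a b : Int) (ha : a ∈ w) (hb : b ∈ w) (hne : a ≠ b) :
    a + b ∈ pairSums w := by
  induction w with
  | nil => simp at ha
  | cons x xs ih =>
    rcases List.mem_cons.1 ha with hax | hax
    · have hbx : b ∈ xs := by
        rcases List.mem_cons.1 hb with h | h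
        · exact absurd (hax.trans h.symm) hne
        · exact h
      exact List.mem_append.2 (Or.inl (List.mem_map.2 ⟨b, hbx, by rw [hax]⟩))
    · rcases List.mem_cons.1 hb with hbx | hbx
      · exact List.mem_append.2 (Or.inl (List.mem_map.2 ⟨a, hax, by rw [hbx, Int.add_comm]⟩))
      · exact List.mem_append.2 (Or.inr (ih hax hbx))

theorem mem_pairSums_iff (w : List Int) (n : Int) :
    n ∈ pairSums w ↔ ∃ m ∈ w, (if n - m = m then 2 else 1) ≤ w.count (n - m) := by
  constructor
  · intro h
    induction w with
    | nil => simp [pairSums] at h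
    | cons x xs ih =>
      rcases List.mem_append.1 h with h' | h'
      · rcases List.mem_map.1 h' with ⟨m, hm, rfl⟩
        refine ⟨m, List.mem_cons_of_mem x hm, ?_⟩
        have hxm : x + m - m = x := by omega
        rw [hxm]
        by_cases hx : x = m
        · rw [if_pos hx]
          have h1 : 0 < xs.count x := List.count_pos_iff.2 (hx ▸ hm)
          simp only [List.count_cons, beq_self_eq_true, if_true]
          omega
        · rw [if_neg hx]
          simp only [List.count_cons, beq_self_eq_true, if_true]
          omega
      · rcases ih h' with ⟨m, hm, hc⟩
        refine ⟨m, List.mem_cons_of_mem x hm, ?_⟩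
        have hle : xs.count (n - m) ≤ (x :: xs).count (n - m) := by
          rw [List.count_cons]; omega
        split_ifs at hc ⊢ <;> omega
  · rintro ⟨m, hm, hc⟩
    by_cases h : n - m = m
    · rw [if_pos h] at hc
      have hn : n = (n - m) + m := by omega
      rw [hn, h]
      exact two_count_mem w m (by rw [← h]; exact hc)
    · rw [if_neg h] at hc
      have hmem : n - m ∈ w := List.count_pos_iff.1 (by omega)
      have hn : n = m + (n - m) := by omega
      rw [hn]
      exact ne_mem_mem w m (n - m) hm hmem (fun he => h (by omega))

theorem test_iff (w : List Int) (d : PySem.Dict Int Int) (n : Int)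
    (hinv : ∀ s, d.getD s 0 = ((pairSums w).count s : Int)) :
    (d.getD n 0 = 0) ↔
      ¬ (w.any (fun m => decide ((if n - m = m then (2 : Int) else 1)
          ≤ (PySem.Dict.counter w).getD (n - m) 0)) = true) := by
  rw [hinv, List.any_eq_true]
  constructor
  · rintro hz ⟨m, hm, hle⟩
    rw [decide_eq_true_iff, PySem.Dict.getD_counter] at hle
    have hmem : n ∈ pairSums w := by
      rw [mem_pairSums_iff]
      refine ⟨m, hm, ?_⟩
      split_ifs at hle ⊢ <;> omega
    rw [← List.count_pos_iff] at hmem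
    omega
  · intro hna
    by_contra hne
    have hmem : n ∈ pairSums w := by
      rw [← List.count_pos_iff]; omega
    rw [mem_pairSums_iff] at hmem
    rcases hmem with ⟨m, hm, hc⟩
    refine hna ⟨m, hm, ?_⟩
    rw [decide_eq_true_iff, PySem.Dict.getD_counter]
    split_ifs at hc ⊢ <;> omega

theorem loops_eq (rest : List Int) (last : List Int) (sums : PySem.Dict Int Int)
    (hinv : ∀ s, sums.getD s 0 = ((pairSums last).count s : Int)) :
    badLoop rest last sums = altLoop rest last := by
  induction rest generalizing last sums with
  | nil => rfl
  | cons n rest ih =>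
    cases last with
    | nil =>
      have hz : sums.getD n 0 = 0 := by rw [hinv]; simp [pairSums]
      have hany := (test_iff [] sums n hinv).1 hz
      simp only [badLoop, altLoop]
      rw [if_pos hz, if_neg hany]
    | cons k tl =>
      simp only [badLoop, altLoop]
      by_cases hz : sums.getD n 0 = 0
      · rw [if_pos hz, if_neg ((test_iff (k :: tl) sums n hinv).1 hz)]
      · rw [if_neg hz,
          if_pos (not_not.1 (fun hna => hz ((test_iff (k :: tl) sums n hinv).2 hna)))]
        rw [PySem.List.slice_from_one, List.tail_cons]
        apply ih
        intro s
        rw [step_getD, hinv, pairSums_append]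
        have hdec : (pairSums (k :: tl)).count s
            = (tl.map (k + ·)).count s + (pairSums tl).count s := by
          simp [pairSums, List.count_append]
        rw [hdec]
        push_cast
        omega

-- ===== VERDICT (by name: the statement is the Claim_ definition above) =====
theorem bad_spec : Claim_equal_bad := by
  intro nums pre _
  unfold Spec_bad bad bad_alt
  apply loops_eq
  intro s
  rw [foldA_getD]
  simp
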